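-- pv_equiv track=rewrite | github.com/JuanJFarina/custom-agent-with-mcp-like-server | custom_agent_with_mcp_like_server/api/tools/reduce_to_numers.py | reduce_to_numbers
-- ===== SOURCE A (Python) =====
-- MAPPING: dict[tuple[str, str, str] | tuple[str, str], str] = {
--     ("a", "j", "s"): "1",
--     ("b", "k", "t"): "2",
--     ("c", "l", "u"): "3",
--     ("d", "m", "v"): "4",
--     ("e", "n", "w"): "5",
--     ("f", "o", "x"): "6",
--     ("g", "p", "y"): "7",
--     ("h", "q", "z"): "8",
--     ("i", "r"): "9",
-- }
--
-- def reduce_to_numbers(string: str) -> str: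
--     """
--     Return a number representation of the given string according to numerology rules.
--
--         Parameters:
--                 string (str): Any string
--
--         Returns:
--                 numeric_representation (str): A numeric representation
--     """
--     result = ""
--     for char in string:
--         for key, value in MAPPING.items():
--             if char in key:
--                 result += value
--                 break
--     return result
-- ===== SOURCE B (Python) =====
-- def reduce_to_numbers(string: str) -> str:
--     """
--     Return a number representation of the given string according to numerology rules.
--     Closed-form: each lowercase letter maps to ((ord-97) % 9) + 1; everything else is dropped.
--     """
--     return "".join(str((ord(char) - 97) % 9 + 1) for char in string if "a" <= char <= "z")
-- ===== Notes on version B (the rewrite author's own statement) =====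
-- stated objective: simpler
-- what changed: Replaced the nested scan over the 9-key MAPPING table (and quadratic string += accumulation) with a one-line closed-form arithmetic rule ((ord(c)-97)%9+1) over lowercase letters, joined once.
import Mathlib
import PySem

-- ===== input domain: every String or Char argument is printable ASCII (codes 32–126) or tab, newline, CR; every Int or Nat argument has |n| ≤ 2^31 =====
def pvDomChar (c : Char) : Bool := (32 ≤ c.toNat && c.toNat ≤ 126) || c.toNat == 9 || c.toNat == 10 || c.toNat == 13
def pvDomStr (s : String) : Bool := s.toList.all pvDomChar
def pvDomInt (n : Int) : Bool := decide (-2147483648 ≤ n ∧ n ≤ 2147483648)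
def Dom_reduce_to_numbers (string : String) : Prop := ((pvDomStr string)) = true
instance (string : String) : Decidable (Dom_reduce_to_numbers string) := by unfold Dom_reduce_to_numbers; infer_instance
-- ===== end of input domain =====

-- B is simpler: one closed-form arithmetic rule instead of a scan over the 9-key MAPPING table.

-- ===== PORT A =====
-- MAPPING as an association list (insertion order of the Python dict).
def pvMapping : List (List Char × String) :=
  [ (['a','j','s'], "1"), (['b','k','t'], "2"), (['c','l','u'], "3"),
    (['d','m','v'], "4"), (['e','n','w'], "5"), (['f','o','x'], "6"),
    (['g','p','y'], "7"), (['h','q','z'], "8"), (['i','r'], "9") ]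

-- inner 'for key, value in MAPPING.items(): if char in key: result += value; break'
def pvInnerA (c : Char) : List (List Char × String) → String
  | [] => ""
  | (k, v) :: rest => if c ∈ k then v else pvInnerA c rest

def reduce_to_numbers (string : String) : String :=
  string.toList.foldl (fun result char => result ++ pvInnerA char pvMapping) ""

-- ===== PORT B =====
-- 'a' <= c <= 'z' guard, digit computed as (ord-97) % 9 + 1 (char code 49 = '1').
def pvStepB (c : Char) : Option Char :=
  if 'a' ≤ c ∧ c ≤ 'z' then some (Char.ofNat ((c.toNat - 97) % 9 + 49)) else none

def reduce_to_numbers_alt (string : String) : String :=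
  String.ofList (string.toList.filterMap pvStepB)

-- ===== PRECONDITION & SPEC =====
def Spec_reduce_to_numbers (string : String) (out : String) : Prop := out = reduce_to_numbers_alt string
instance (string : String) (out : String) : Decidable (Spec_reduce_to_numbers string out) := by unfold Spec_reduce_to_numbers; infer_instance

-- ===== CLAIM (what is proved, stated in full; the proofs are below) =====
def Claim_equal_reduce_to_numbers : Prop := ∀ (string : String), Dom_reduce_to_numbers string → Spec_reduce_to_numbers string (reduce_to_numbers string)

-- ===== LEMMAS AND PROOFS =====

-- per-character agreement: A's table scan yields exactly B's step, for any char code ≤ 255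
set_option maxRecDepth 4096 in
theorem step_agree (c : Char) (h : c.toNat ≤ 255) :
    pvInnerA c pvMapping = String.ofList ((pvStepB c).toList) := by
  have hc : Char.ofNat c.toNat = c := Char.ofNat_toNat c
  rw [← hc]
  have h' : c.toNat < 256 := Nat.lt_succ_of_le h
  revert h'
  generalize c.toNat = n
  revert n
  decide

theorem foldl_eq (l : List Char) (hl : ∀ c ∈ l, c.toNat ≤ 255) (acc : List Char) :
    l.foldl (fun result char => result ++ pvInnerA char pvMapping) (String.ofList acc)
      = String.ofList (acc ++ l.filterMap pvStepB) := by
  induction l generalizing acc with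
  | nil => simp
  | cons c rest ih =>
    have hstep := step_agree c (hl c (by simp))
    simp only [List.foldl_cons, List.filterMap_cons]
    rw [show String.ofList acc ++ pvInnerA c pvMapping = String.ofList (acc ++ (pvStepB c).toList) by
          rw [hstep, String.ofList_append]]
    rw [ih (fun d hd => hl d (by simp [hd]))]
    cases hsb : pvStepB c <;> simp

-- ===== VERDICT (by name: the statement is the Claim_ definition above) =====
theorem reduce_to_numbers_spec : Claim_equal_reduce_to_numbers := by
  intro s hdom
  unfold Spec_reduce_to_numbers reduce_to_numbers reduce_to_numbers_alt
  have hl : ∀ c ∈ s.toList, c.toNat ≤ 255 := by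
    intro c hc
    have := List.all_eq_true.mp hdom c hc
    simp [pvDomChar] at this
    omega
  have := foldl_eq s.toList hl []
  simpa using this
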